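-- pv_equiv track=rewrite | github.com/Javilejoo/Lexical-Analyzer-Generator | analizadorLexico.py | expandir_reglas
-- ===== SOURCE A (Python) =====
-- def expandir_reglas(reglas, definiciones_expandidas):
--     expanded_rules = []
--     for patron, accion in reglas:
--         tokens = []
--         current_token = []
--         in_quote = False
--         quote_char = None  # Tipo de comilla (' o ")
--
--         # Tokenización del patrón
--         for char in patron:
--             if char in {'"', '\''}:
--                 if in_quote and char == quote_char:
--                     # Fin de literal
--                     tokens.append(f"'{''.join(current_token)}'")  # Forzar comillas simples
--                     current_token = []
--                     in_quote = False
--                     quote_char = None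
--                 else:
--                     # Inicio de literal
--                     in_quote = True
--                     quote_char = char
--             elif in_quote:
--                 current_token.append(char)
--             elif char in ('+', '*', '?', '|', '(', ')'):
--                 if current_token:
--                     tokens.append(''.join(current_token))
--                     current_token = []
--                 tokens.append(char)
--             elif char.isspace():
--                 if current_token:
--                     tokens.append(''.join(current_token))
--                     current_token = []
--             else:
--                 current_token.append(char)
--
--         if current_token:
--             tokens.append(''.join(current_token))
--
--         # Procesamiento de tokens
--         expanded_tokens = []
--         for token in tokens:
--             if token.startswith("'") and token.endswith("'"):
--                 contenido = token[1:-1]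
--                 if contenido in ('+', '-', '*', '/', '(', ')'):  # Operadores
--                     expanded_tokens.append(f"('{contenido}')")  # Comillas simples
--                 else:  # Palabras reservadas
--                     expanded_tokens.append(f"({contenido})")  # Sin comillas
--             elif token in definiciones_expandidas:
--                 expanded_tokens.append(definiciones_expandidas[token])
--             elif token in ('+', '*', '?'):
--                 if expanded_tokens:
--                     base = expanded_tokens.pop()
--                     expanded_tokens.append(f"{base}{token}")
--             else:
--                 expanded_tokens.append(token)
--
--         # Unir tokens
--         expanded_pattern = ''.join(expanded_tokens)
--         expanded_rules.append((expanded_pattern, accion))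
--
--     return expanded_rules
-- ===== SOURCE B (Python) =====
-- # Single fused pass: tokens are classified and emitted the moment they are
-- # finalized, instead of building an intermediate token list first.
--
-- def expandir_reglas(reglas, definiciones_expandidas):
--     def _expand(patron):
--         out = []
--
--         def emit_quoted(content):
--             if content in ('+', '-', '*', '/', '(', ')'):
--                 out.append("('" + content + "')")
--             else:
--                 out.append("(" + content + ")")
--
--         def emit_bare(text):
--             if text in definiciones_expandidas:
--                 out.append(definiciones_expandidas[text])
--             elif text in ('+', '*', '?'):
--                 if out:
--                     out.append(out.pop() + text)
--             else:
--                 out.append(text)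
--
--         buf = []
--         in_quote = False
--         qc = None
--         for ch in patron:
--             if ch in ('"', "'"):
--                 if in_quote and ch == qc:
--                     emit_quoted(''.join(buf))
--                     buf = []
--                     in_quote = False
--                     qc = None
--                 else:
--                     in_quote = True
--                     qc = ch
--             elif in_quote:
--                 buf.append(ch)
--             elif ch in ('+', '*', '?', '|', '(', ')'):
--                 if buf:
--                     emit_bare(''.join(buf))
--                     buf = []
--                 emit_bare(ch)
--             elif ch.isspace():
--                 if buf:
--                     emit_bare(''.join(buf))
--                     buf = []
--             else:
--                 buf.append(ch)
--         if buf: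
--             emit_bare(''.join(buf))
--         return ''.join(out)
--
--     return [(_expand(patron), accion) for patron, accion in reglas]
-- ===== Notes on version B (the rewrite author's own statement) =====
-- stated objective: alternative
-- what changed: A tokenizes each pattern into an intermediate token list and then classifies/expands it in a second pass; B runs one fused pass over the characters that classifies and emits each token the moment it is finalized, so the intermediate token list disappears.
import Mathlib
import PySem

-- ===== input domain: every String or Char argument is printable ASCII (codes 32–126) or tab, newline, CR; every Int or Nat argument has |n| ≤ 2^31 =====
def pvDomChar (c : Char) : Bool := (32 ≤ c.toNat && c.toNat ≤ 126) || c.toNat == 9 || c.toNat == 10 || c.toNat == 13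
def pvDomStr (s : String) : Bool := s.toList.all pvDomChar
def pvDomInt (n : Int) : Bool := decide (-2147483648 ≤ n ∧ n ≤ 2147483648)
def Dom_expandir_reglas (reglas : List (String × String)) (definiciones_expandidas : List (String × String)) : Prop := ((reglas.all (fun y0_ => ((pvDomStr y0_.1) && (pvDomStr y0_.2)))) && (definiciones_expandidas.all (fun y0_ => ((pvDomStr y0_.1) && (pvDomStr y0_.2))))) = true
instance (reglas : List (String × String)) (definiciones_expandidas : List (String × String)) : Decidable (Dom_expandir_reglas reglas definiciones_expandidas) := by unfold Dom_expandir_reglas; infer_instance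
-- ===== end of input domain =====

-- A tokenizes each pattern into an intermediate token list and classifies it in a
-- second pass; B is one fused pass that classifies/emits each token the moment it
-- is finalized ("alternative": same cost, different decomposition).

-- shared character/token classes (the literal sets both Pythons spell out)
def pvIsQuote (c : Char) : Bool := c == '"' || c == '\''
def pvIsOpChar (c : Char) : Bool := c == '+' || c == '*' || c == '?' || c == '|' || c == '(' || c == ')'
def pvIsArith (t : List Char) : Bool := t == ['+'] || t == ['-'] || t == ['*'] || t == ['/'] || t == ['('] || t == [')']
def pvIsPostfix (t : List Char) : Bool := t == ['+'] || t == ['*'] || t == ['?']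

-- ===== PORT A =====
-- tokenization loop of A: state (tokens, current_token, in_quote, quote_char)
def pvAStep (st : List (List Char) × List Char × Bool × Option Char) (c : Char) :
    List (List Char) × List Char × Bool × Option Char :=
  let (toks, cur, iq, qc) := st
  if pvIsQuote c then
    if iq && (qc == some c) then (toks ++ [['\''] ++ cur ++ ['\'']], [], false, none)
    else (toks, cur, true, some c)
  else if iq then (toks, cur ++ [c], iq, qc)
  else if pvIsOpChar c then
    if cur.isEmpty then (toks ++ [[c]], [], iq, qc)
    else (toks ++ [cur, [c]], [], iq, qc)
  else if PySem.Chars.isspace c then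
    if cur.isEmpty then (toks, cur, iq, qc) else (toks ++ [cur], [], iq, qc)
  else (toks, cur ++ [c], iq, qc)

def pvATokens (p : List Char) : List (List Char) :=
  match p.foldl pvAStep ([], [], false, none) with
  | (toks, cur, _, _) => if cur.isEmpty then toks else toks ++ [cur]

-- second pass of A: classification of one token (expanded_tokens accumulator)
def pvAClassify (d : PySem.Dict String String) (out : List (List Char)) (t : List Char) :
    List (List Char) :=
  if PySem.Chars.startswith t ['\''] && PySem.Chars.endswith t ['\''] then
    let contenido := PySem.Chars.slice t (some 1) (some (-1))
    if pvIsArith contenido then out ++ [['(', '\''] ++ contenido ++ ['\'', ')']]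
    else out ++ [['('] ++ contenido ++ [')']]
  else
    match d.get? (String.ofList t) with
    | some v => out ++ [v.toList]
    | none =>
      if pvIsPostfix t then
        match out.getLast? with
        | none => out
        | some base => out.dropLast ++ [base ++ t]
      else out ++ [t]

def expandir_reglas (reglas : List (String × String)) (definiciones_expandidas : List (String × String)) : List (String × String) :=
  let d := PySem.Dict.mk definiciones_expandidas
  reglas.foldl (fun acc pa =>
    acc ++ [(String.ofList (((pvATokens pa.1.toList).foldl (pvAClassify d) []).flatten), pa.2)]) []

-- ===== PORT B =====
-- B's emit helpers: a finalized token is classified immediately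
def pvBEmitQuoted (out : List (List Char)) (content : List Char) : List (List Char) :=
  if pvIsArith content then out ++ [['(', '\''] ++ content ++ ['\'', ')']]
  else out ++ [['('] ++ content ++ [')']]

def pvBEmitBare (d : PySem.Dict String String) (out : List (List Char)) (t : List Char) :
    List (List Char) :=
  match d.get? (String.ofList t) with
  | some v => out ++ [v.toList]
  | none =>
    if pvIsPostfix t then
      match out.getLast? with
      | none => out
      | some base => out.dropLast ++ [base ++ t]
    else out ++ [t]

-- B's fused loop: state (out, buf, in_quote, qc); emits at every token boundary
def pvBStep (d : PySem.Dict String String)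
    (st : List (List Char) × List Char × Bool × Option Char) (c : Char) :
    List (List Char) × List Char × Bool × Option Char :=
  let (out, buf, iq, qc) := st
  if pvIsQuote c then
    if iq && (qc == some c) then (pvBEmitQuoted out buf, [], false, none)
    else (out, buf, true, some c)
  else if iq then (out, buf ++ [c], iq, qc)
  else if pvIsOpChar c then
    let out' := if buf.isEmpty then out else pvBEmitBare d out buf
    (pvBEmitBare d out' [c], [], iq, qc)
  else if PySem.Chars.isspace c then
    if buf.isEmpty then (out, buf, iq, qc) else (pvBEmitBare d out buf, [], iq, qc)
  else (out, buf ++ [c], iq, qc)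

-- the trailing flush of B's loop ('if buf: emit_bare(...)')
def pvBFinish (d : PySem.Dict String String)
    (st : List (List Char) × List Char × Bool × Option Char) : List (List Char) :=
  match st with
  | (out, buf, _, _) => if buf.isEmpty then out else pvBEmitBare d out buf

def pvBPattern (d : PySem.Dict String String) (p : List Char) : List Char :=
  (pvBFinish d (p.foldl (pvBStep d) ([], [], false, none))).flatten

def expandir_reglas_alt (reglas : List (String × String)) (definiciones_expandidas : List (String × String)) : List (String × String) :=
  let d := PySem.Dict.mk definiciones_expandidas
  reglas.map (fun pa => (String.ofList (pvBPattern d pa.1.toList), pa.2))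

-- ===== PRECONDITION & SPEC =====
def Spec_expandir_reglas (reglas : List (String × String)) (definiciones_expandidas : List (String × String)) (out : List (String × String)) : Prop := out = expandir_reglas_alt reglas definiciones_expandidas
instance (reglas : List (String × String)) (definiciones_expandidas : List (String × String)) (out : List (String × String)) : Decidable (Spec_expandir_reglas reglas definiciones_expandidas out) := by unfold Spec_expandir_reglas; infer_instance

-- ===== CLAIM (what is proved, stated in full; the proofs are below) =====
def Claim_equal_expandir_reglas : Prop := ∀ (reglas : List (String × String)) (definiciones_expandidas : List (String × String)), Dom_expandir_reglas reglas definiciones_expandidas → Spec_expandir_reglas reglas definiciones_expandidas (expandir_reglas reglas definiciones_expandidas)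

-- ===== LEMMAS AND PROOFS =====

-- A's token accumulator only ever grows by appends
theorem pvAStep_append (toks : List (List Char)) (cur : List Char) (iq : Bool)
    (qc : Option Char) (c : Char) :
    pvAStep (toks, cur, iq, qc) c =
      ((toks ++ (pvAStep ([], cur, iq, qc) c).1, (pvAStep ([], cur, iq, qc) c).2)) := by
  simp only [pvAStep]
  split_ifs <;> simp

theorem pvAFold_append (cs : List Char) (toks : List (List Char)) (cur : List Char)
    (iq : Bool) (qc : Option Char) :
    cs.foldl pvAStep (toks, cur, iq, qc) =
      ((toks ++ (cs.foldl pvAStep ([], cur, iq, qc)).1,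
        (cs.foldl pvAStep ([], cur, iq, qc)).2)) := by
  induction cs generalizing toks cur iq qc with
  | nil => simp
  | cons c cs ih =>
    simp only [List.foldl_cons]
    rw [pvAStep_append]
    obtain ⟨t1, cur1, iq1, qc1⟩ := pvAStep ([], cur, iq, qc) c
    rw [ih, ih t1]
    simp

-- the tokens A would still emit from an intermediate state (cur, iq, qc)
def pvATokensFrom (cs : List Char) (cur : List Char) (iq : Bool) (qc : Option Char) :
    List (List Char) :=
  match cs.foldl pvAStep ([], cur, iq, qc) with
  | (toks, cur', _, _) => toks ++ (if cur'.isEmpty then [] else [cur'])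

theorem pvATokens_eq_from (p : List Char) : pvATokens p = pvATokensFrom p [] false none := by
  simp only [pvATokens, pvATokensFrom]
  obtain ⟨t, cur, iq, qc⟩ := p.foldl pvAStep ([], [], false, none)
  split <;> simp_all

theorem pvATokensFrom_cons (c : Char) (cs cur : List Char) (iq : Bool) (qc : Option Char) :
    pvATokensFrom (c :: cs) cur iq qc =
      (pvAStep ([], cur, iq, qc) c).1 ++
        pvATokensFrom cs (pvAStep ([], cur, iq, qc) c).2.1
          (pvAStep ([], cur, iq, qc) c).2.2.1 (pvAStep ([], cur, iq, qc) c).2.2.2 := by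
  simp only [pvATokensFrom, List.foldl_cons]
  obtain ⟨t1, cur1, iq1, qc1⟩ := pvAStep ([], cur, iq, qc) c
  rw [pvAFold_append cs t1 cur1 iq1 qc1]
  obtain ⟨t2, cur2, i2, q2⟩ := cs.foldl pvAStep ([], cur1, iq1, qc1)
  simp

-- classification of a finished quoted literal is B's quoted emission
theorem pvAClassify_quoted (d : PySem.Dict String String) (out : List (List Char))
    (content : List Char) :
    pvAClassify d out ('\'' :: (content ++ ['\''])) = pvBEmitQuoted out content := by
  have hs : PySem.Chars.startswith ('\'' :: (content ++ ['\''])) ['\''] = true := by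
    rw [PySem.Chars.startswith_iff]; exact ⟨content ++ ['\''], by simp⟩
  have he : PySem.Chars.endswith ('\'' :: (content ++ ['\''])) ['\''] = true := by
    rw [PySem.Chars.endswith_iff]; exact ⟨['\''] ++ content, by simp⟩
  have hsl : PySem.Chars.slice ('\'' :: (content ++ ['\''])) (some 1) (some (-1)) = content := by
    simp only [PySem.Chars.slice_eq_listSlice, PySem.List.slice, PySem.List.clampIdx_neg_one]
    simp [PySem.List.clampIdx]
  simp only [pvAClassify, hs, he, Bool.and_self, if_true, hsl, pvBEmitQuoted]

-- classification of a bare token (never contains a quote) is B's bare emission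
theorem pvAClassify_bare (d : PySem.Dict String String) (out : List (List Char))
    (t : List Char) (h : '\'' ∉ t) :
    pvAClassify d out t = pvBEmitBare d out t := by
  have hs : PySem.Chars.startswith t ['\''] = false := by
    rw [Bool.eq_false_iff]
    intro hc
    rw [PySem.Chars.startswith_iff] at hc
    obtain ⟨r, hr⟩ := hc
    exact h (by rw [← hr]; simp)
  simp [pvAClassify, pvBEmitBare, hs]

-- MAIN INVARIANT: from any shared intermediate state, B's fused loop plus its
-- final flush equals A's remaining tokens pushed through A's classify pass.
theorem pvFuse (d : PySem.Dict String String) (cs : List Char) (out : List (List Char))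
    (buf : List Char) (iq : Bool) (qc : Option Char) (hb : '\'' ∉ buf) :
    pvBFinish d (cs.foldl (pvBStep d) (out, buf, iq, qc)) =
      (pvATokensFrom cs buf iq qc).foldl (pvAClassify d) out := by
  induction cs generalizing out buf iq qc with
  | nil =>
    simp only [List.foldl_nil, pvATokensFrom, pvBFinish]
    by_cases hbe : buf.isEmpty <;>
      simp [hbe, pvAClassify_bare d out buf hb]
  | cons c cs ih =>
    rw [List.foldl_cons, pvATokensFrom_cons]
    by_cases hq : pvIsQuote c = true
    · by_cases hcl : (iq && (qc == some c)) = true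
      · -- quote closes: both emit the quoted literal
        have hB : pvBStep d (out, buf, iq, qc) c = (pvBEmitQuoted out buf, [], false, none) := by
          simp [pvBStep, hq, hcl]
        have hA : pvAStep ([], buf, iq, qc) c = ([['\''] ++ buf ++ ['\'']], [], false, none) := by
          simp [pvAStep, hq, hcl]
        rw [hB, hA, ih _ _ _ _ (by simp)]
        simp [pvAClassify_quoted]
      · -- quote opens / switches: state change only
        have hB : pvBStep d (out, buf, iq, qc) c = (out, buf, true, some c) := by
          simp [pvBStep, hq, hcl]
        have hA : pvAStep ([], buf, iq, qc) c = ([], buf, true, some c) := by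
          simp [pvAStep, hq, hcl]
        rw [hB, hA, ih _ _ _ _ hb]
        simp
    · have hq' : c ≠ '\'' := fun hc => by simp [pvIsQuote, hc] at hq
      have hq'' : '\'' ∉ [c] := by
        simp only [List.mem_singleton]
        exact Ne.symm hq'
      by_cases hiq : iq = true
      · -- inside a quote: the char goes to the buffer
        have hB : pvBStep d (out, buf, iq, qc) c = (out, buf ++ [c], iq, qc) := by
          simp [pvBStep, hq, hiq]
        have hA : pvAStep ([], buf, iq, qc) c = ([], buf ++ [c], iq, qc) := by
          simp [pvAStep, hq, hiq]
        have hb' : '\'' ∉ buf ++ [c] := by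
          intro h
          rcases List.mem_append.mp h with h | h
          · exact hb h
          · exact hq'' h
        rw [hB, hA, ih _ _ _ _ hb']
        simp
      · by_cases hop : pvIsOpChar c = true
        · -- operator char: flush the buffer (if any), then emit the operator
          by_cases hbe : buf.isEmpty
          · have hB : pvBStep d (out, buf, iq, qc) c = (pvBEmitBare d out [c], [], iq, qc) := by
              simp [pvBStep, hq, hiq, hop, hbe]
            have hA : pvAStep ([], buf, iq, qc) c = ([[c]], [], iq, qc) := by
              simp [pvAStep, hq, hiq, hop, hbe]
            rw [hB, hA, ih _ _ _ _ (by simp)]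
            simp [pvAClassify_bare d out [c] hq'']
          · have hB : pvBStep d (out, buf, iq, qc) c =
                (pvBEmitBare d (pvBEmitBare d out buf) [c], [], iq, qc) := by
              simp [pvBStep, hq, hiq, hop, hbe]
            have hA : pvAStep ([], buf, iq, qc) c = ([buf, [c]], [], iq, qc) := by
              simp [pvAStep, hq, hiq, hop, hbe]
            rw [hB, hA, ih _ _ _ _ (by simp)]
            simp [pvAClassify_bare d out buf hb,
                  pvAClassify_bare d (pvBEmitBare d out buf) [c] hq'']
        · by_cases hsp : PySem.Chars.isspace c = true
          · -- whitespace: flush the buffer (if any)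
            by_cases hbe : buf.isEmpty
            · have hB : pvBStep d (out, buf, iq, qc) c = (out, buf, iq, qc) := by
                simp [pvBStep, hq, hiq, hop, hsp, hbe]
              have hA : pvAStep ([], buf, iq, qc) c = ([], buf, iq, qc) := by
                simp [pvAStep, hq, hiq, hop, hsp, hbe]
              rw [hB, hA, ih _ _ _ _ hb]
              simp
            · have hB : pvBStep d (out, buf, iq, qc) c = (pvBEmitBare d out buf, [], iq, qc) := by
                simp [pvBStep, hq, hiq, hop, hsp, hbe]
              have hA : pvAStep ([], buf, iq, qc) c = ([buf], [], iq, qc) := by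
                simp [pvAStep, hq, hiq, hop, hsp, hbe]
              rw [hB, hA, ih _ _ _ _ (by simp)]
              simp [pvAClassify_bare d out buf hb]
          · -- ordinary char: goes to the buffer
            have hB : pvBStep d (out, buf, iq, qc) c = (out, buf ++ [c], iq, qc) := by
              simp [pvBStep, hq, hiq, hop, hsp]
            have hA : pvAStep ([], buf, iq, qc) c = ([], buf ++ [c], iq, qc) := by
              simp [pvAStep, hq, hiq, hop, hsp]
            have hb' : '\'' ∉ buf ++ [c] := by
              intro h
              rcases List.mem_append.mp h with h | h
              · exact hb h
              · exact hq'' h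
            rw [hB, hA, ih _ _ _ _ hb']
            simp

-- per-pattern agreement
theorem pvPattern_eq (d : PySem.Dict String String) (p : List Char) :
    pvBPattern d p = ((pvATokens p).foldl (pvAClassify d) []).flatten := by
  rw [pvBPattern, pvATokens_eq_from, pvFuse d p [] [] false none (by simp)]

-- ===== VERDICT (by name: the statement is the Claim_ definition above) =====
theorem expandir_reglas_spec : Claim_equal_expandir_reglas := by
  intro reglas defs _
  unfold Spec_expandir_reglas expandir_reglas expandir_reglas_alt
  rw [PySem.List.foldl_append_singleton_eq_map]
  simp [pvPattern_eq]
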